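-- pv_equiv track=rewrite | github.com/acycliczebra/Eye | eye/eyescript/tokenizer.py | _comment_tokenizer
-- ===== SOURCE A (Python) =====
-- def _comment_tokenizer(tokens):
--     comment = ''
--     for type, token in tokens:
--         if comment:
--             comment += token
--             continue
--
--         if type != '?':
--             yield (type, token)
--             continue
--
--         elif '#' in token:
--             loc = token.find('#')
--             yield ('?', token[:loc])
--             comment = token[loc:]
--         else:
--             yield ('?', token)
--
--     if comment:
--         yield ('COMMENT', comment)
-- ===== SOURCE B (Python) =====
-- def _comment_tokenizer(tokens):
--     toks = list(tokens)
--     i = next((k for k, (ty, tok) in enumerate(toks)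
--               if ty == '?' and '#' in tok), None)
--     if i is None:
--         yield from toks
--         return
--     tok = toks[i][1]
--     loc = tok.find('#')
--     yield from toks[:i]
--     yield ('?', tok[:loc])
--     yield ('COMMENT', tok[loc:] + ''.join(t for _, t in toks[i + 1:]))
-- ===== Notes on version B (the rewrite author's own statement) =====
-- stated objective: simpler
-- what changed: Replaces A's persistent comment-flag state machine with a staged index computation: find the index of the first '?' token containing '#', then assemble the result from list slices (the untouched prefix, the split token, and one COMMENT joining the remaining tokens).
import Mathlib
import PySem

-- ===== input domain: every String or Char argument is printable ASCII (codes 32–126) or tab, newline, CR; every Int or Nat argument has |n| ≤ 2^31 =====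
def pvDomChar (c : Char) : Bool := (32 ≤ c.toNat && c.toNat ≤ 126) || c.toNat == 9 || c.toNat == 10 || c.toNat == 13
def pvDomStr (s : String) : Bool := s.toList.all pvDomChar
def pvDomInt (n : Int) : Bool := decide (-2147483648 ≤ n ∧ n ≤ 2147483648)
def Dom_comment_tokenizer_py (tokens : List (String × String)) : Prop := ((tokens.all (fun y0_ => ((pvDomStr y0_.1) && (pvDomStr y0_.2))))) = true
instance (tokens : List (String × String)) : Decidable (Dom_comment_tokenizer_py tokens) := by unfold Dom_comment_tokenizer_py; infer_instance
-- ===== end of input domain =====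

-- B replaces A's persistent comment-flag state machine with a staged pass:
-- find the index of the first '?' token containing '#', then assemble the
-- result from slices of the list.  Objective: simpler; same cost.


-- ===== PORT A =====
-- A's loop: state is the accumulated `comment` string (Python truthiness = ≠ "")
def pvALoop : List (String × String) → String → List (String × String)
  | [], comment => if comment ≠ "" then [("COMMENT", comment)] else []
  | (ty, tok) :: rest, comment =>
    if comment ≠ "" then pvALoop rest (comment ++ tok)
    else if ty ≠ "?" then (ty, tok) :: pvALoop rest comment
    else if PySem.Str.isIn "#" tok then
      let loc := PySem.Str.find tok "#"
      ("?", PySem.Str.slice tok none (some loc)) ::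
        pvALoop rest (PySem.Str.slice tok (some loc) none)
    else ("?", tok) :: pvALoop rest comment

def comment_tokenizer_py (tokens : List (String × String)) : List (String × String) :=
  pvALoop tokens ""

-- ===== PORT B =====
-- B's trigger predicate: a '?' token containing '#'
def pvTrig (p : String × String) : Bool := p.1 == "?" && PySem.Str.isIn "#" p.2

-- B: find the trigger index, then build the output from slices of the list
def comment_tokenizer_py_alt (tokens : List (String × String)) : List (String × String) :=
  match tokens.findIdx? pvTrig with
  | none => tokens
  | some i =>
    let tok := (tokens.getD i ("", "")).2
    let loc := PySem.Str.find tok "#"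
    tokens.take i ++
      [("?", PySem.Str.slice tok none (some loc)),
       ("COMMENT", PySem.Str.slice tok (some loc) none ++
          PySem.Str.join "" ((tokens.drop (i + 1)).map Prod.snd))]

-- ===== PRECONDITION & SPEC =====
def Spec_comment_tokenizer_py (tokens : List (String × String)) (out : List (String × String)) : Prop := out = comment_tokenizer_py_alt tokens
instance (tokens : List (String × String)) (out : List (String × String)) : Decidable (Spec_comment_tokenizer_py tokens out) := by unfold Spec_comment_tokenizer_py; infer_instance

-- ===== CLAIM (what is proved, stated in full; the proofs are below) =====
def Claim_equal_comment_tokenizer_py : Prop := ∀ (tokens : List (String × String)), Dom_comment_tokenizer_py tokens → Spec_comment_tokenizer_py tokens (comment_tokenizer_py tokens)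

-- ===== LEMMAS AND PROOFS =====

-- proof-only intermediate form: one recursive pass equal to both programs
def pvMid : List (String × String) → List (String × String)
  | [] => []
  | (ty, tok) :: rest =>
    if ty = "?" ∧ PySem.Str.isIn "#" tok then
      let loc := PySem.Str.find tok "#"
      [("?", PySem.Str.slice tok none (some loc)),
       ("COMMENT", PySem.Str.slice tok (some loc) none ++ PySem.Str.join "" (rest.map Prod.snd))]
    else (ty, tok) :: pvMid rest

theorem pv_append_ne_empty (c t : String) (h : c ≠ "") : c ++ t ≠ "" := by
  intro he
  apply h
  have := congrArg String.toList he
  simp at this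
  exact this.1

theorem pv_join_empty_cons (t : String) (ts : List String) :
    PySem.Str.join "" (t :: ts) = t ++ PySem.Str.join "" ts := by
  apply String.ext
  cases ts with
  | nil => simp [PySem.Str.toList_join, PySem.Chars.join, List.intercalate]
  | cons u us => simp [PySem.Str.toList_join, PySem.Chars.join, List.intercalate]

theorem pv_join_empty_nil : PySem.Str.join "" ([] : List String) = "" := by
  apply String.ext
  simp [PySem.Str.toList_join, PySem.Chars.join, List.intercalate]

-- once `comment` is nonempty, A just accumulates every remaining token and flushes
theorem pvALoop_comment (rest : List (String × String)) (c : String) (h : c ≠ "") :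
    pvALoop rest c = [("COMMENT", c ++ PySem.Str.join "" (rest.map Prod.snd))] := by
  induction rest generalizing c with
  | nil => simp [pvALoop, h, pv_join_empty_nil]
  | cons p rest ih =>
    obtain ⟨ty, tok⟩ := p
    rw [pvALoop.eq_def]
    simp only [h, ne_eq, not_false_eq_true, if_true]
    rw [ih (c ++ tok) (pv_append_ne_empty c tok h)]
    simp [pv_join_empty_cons, String.append_assoc]

-- the tail of the token at its first '#' is a nonempty string
theorem pv_tail_ne_empty (tok : String) (h : PySem.Str.isIn "#" tok = true) :
    PySem.Str.slice tok (some (PySem.Str.find tok "#")) none ≠ "" := by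
  have hnn : 0 ≤ PySem.Chars.find tok.toList "#".toList :=
    (PySem.Chars.find_nonneg_iff _ _).mpr ((PySem.Str.isIn_iff_infix _ _).mp h)
  have hspec := (PySem.Chars.find_spec hnn).1
  intro he
  have hl := congrArg String.toList he
  rw [PySem.Str.toList_slice] at hl
  simp only [PySem.Str.find, PySem.Chars.slice_eq_listSlice] at hl
  rw [PySem.List.slice_from _ hnn] at hl
  simp only [String.toList_empty] at hl
  rw [hl] at hspec
  rcases hspec with ⟨t, ht⟩
  simp at ht

theorem pvALoop_eq_pvMid (tokens : List (String × String)) :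
    pvALoop tokens "" = pvMid tokens := by
  induction tokens with
  | nil => simp [pvALoop, pvMid]
  | cons p rest ih =>
    obtain ⟨ty, tok⟩ := p
    simp only [pvALoop, pvMid]
    by_cases hq : ty = "?"
    · subst hq
      by_cases hh : PySem.Str.isIn "#" tok = true
      · rw [if_neg (by simp), if_neg (by simp), if_pos hh, if_pos ⟨rfl, hh⟩]
        rw [pvALoop_comment rest _ (pv_tail_ne_empty tok hh)]
      · rw [if_neg (by simp), if_neg (by simp), if_neg (by simpa using hh),
          if_neg (by simpa using hh), ih]
    · rw [if_neg (by simp), if_pos (by simp [hq]), if_neg (by simp [hq]), ih]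

theorem pvAlt_eq_pvMid (tokens : List (String × String)) :
    comment_tokenizer_py_alt tokens = pvMid tokens := by
  induction tokens with
  | nil => simp [comment_tokenizer_py_alt, pvMid]
  | cons p rest ih =>
    obtain ⟨ty, tok⟩ := p
    by_cases ht : pvTrig (ty, tok) = true
    · obtain ⟨hq, hh⟩ : ty = "?" ∧ PySem.Str.isIn "#" tok = true := by
        simpa [pvTrig] using ht
      subst hq
      have hh' : PySem.Chars.isIn ['#'] tok.toList = true := by
        simpa [PySem.Str.isIn] using hh
      simp [comment_tokenizer_py_alt, pvMid, List.findIdx?_cons, pvTrig, hh, hh']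
    · have hc : ¬ (ty = "?" ∧ PySem.Str.isIn "#" tok = true) := by
        simpa [pvTrig] using ht
      simp only [pvMid, if_neg hc]
      rw [← ih]
      simp only [comment_tokenizer_py_alt, List.findIdx?_cons, ht, cond_false]
      cases hf : rest.findIdx? pvTrig with
      | none => simp [hf]
      | some i => simp [hf, List.take_succ_cons, List.getD]

-- ===== VERDICT (by name: the statement is the Claim_ definition above) =====
theorem comment_tokenizer_py_spec : Claim_equal_comment_tokenizer_py := by
  intro tokens _
  unfold Spec_comment_tokenizer_py comment_tokenizer_py
  rw [pvALoop_eq_pvMid, pvAlt_eq_pvMid]
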